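-- pv_equiv track=rewrite | github.com/alimalim77/Python-Practice-Track | Educative Track/password_generator.py | checklen
-- ===== SOURCE A (Python) =====
-- def checklen(l, mystr,actstring):
--     numlist = []
--     for i in mystr:
--         if int(i) <= len(actstring):
--             numlist.append(int(i))
--     if numlist:
--         a = max(numlist)
--         return actstring[a-1]
--     else:
--         return 'X'
-- ===== SOURCE B (Python) =====
-- def checklen(l, mystr, actstring):
--     present = {int(c) for c in mystr}
--     for v in range(min(len(actstring), 9), -1, -1):
--         if v in present:
--             return actstring[v - 1]
--     return 'X'
-- ===== Notes on version B (the rewrite author's own statement) =====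
-- stated objective: alternative
-- what changed: A collects every digit value that fits into a list and then takes max(); B builds the set of digit values once and scans candidate values downward from min(len(actstring), 9), returning at the first value present in the set.
import Mathlib
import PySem

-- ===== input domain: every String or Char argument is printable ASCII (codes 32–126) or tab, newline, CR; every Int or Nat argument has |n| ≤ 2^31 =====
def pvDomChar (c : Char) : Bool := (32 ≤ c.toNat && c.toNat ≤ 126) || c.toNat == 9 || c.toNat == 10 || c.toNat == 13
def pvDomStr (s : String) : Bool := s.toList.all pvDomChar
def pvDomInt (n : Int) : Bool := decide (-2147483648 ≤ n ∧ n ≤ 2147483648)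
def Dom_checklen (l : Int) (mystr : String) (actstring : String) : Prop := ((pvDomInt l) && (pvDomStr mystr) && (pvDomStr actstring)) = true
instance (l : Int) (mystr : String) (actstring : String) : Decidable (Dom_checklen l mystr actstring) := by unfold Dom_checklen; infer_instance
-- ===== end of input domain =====

-- B replaces A's "collect all fitting digits, then take max" with "build the digit set once,
-- then search candidate values downward from min(len(actstring),9)": a different decomposition
-- of similar cost (objective: alternative).

-- shared helper: Python's int(c) for a single character, total form
-- (getD 0 is never reached under Pre_checklen, which admits only digit characters)
def pvIntChar (c : Char) : Int := (PySem.Int.ofStr? (String.ofList [c])).getD 0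

-- ===== PORT A =====
def checklen (l : Int) (mystr : String) (actstring : String) : String :=
  let numlist : List Int := mystr.toList.foldl
    (fun acc c => if pvIntChar c ≤ PySem.Str.len actstring then acc ++ [pvIntChar c] else acc) []
  match PySem.List.max? numlist (fun x => x) with
  | some a => String.ofList [(PySem.Str.pyGet? actstring (a - 1)).getD 'X']  -- getD unreachable under Pre_
  | none => "X"

-- ===== PORT B =====
-- the descending scan 'for v in range(m, -1, -1)'
def pvDescend (s : List Int) (act : String) : Nat → String
  | 0 => if (0 : Int) ∈ s then String.ofList [(PySem.Str.pyGet? act ((0 : Int) - 1)).getD 'X'] else "X"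
  | v + 1 =>
      if ((v : Int) + 1) ∈ s then String.ofList [(PySem.Str.pyGet? act (((v : Int) + 1) - 1)).getD 'X']
      else pvDescend s act v

def checklen_alt (l : Int) (mystr : String) (actstring : String) : String :=
  let present : PySem.Set Int := PySem.Set.ofList (mystr.toList.map pvIntChar)
  pvDescend present actstring (min (PySem.Str.len actstring) 9).toNat

-- ===== PRECONDITION & SPEC =====
-- Pre_ excludes exactly the inputs on which the Python A raises: any non-digit character in
-- mystr (ValueError from int(i)), and an empty actstring together with '0' in mystr
-- (then max(numlist) = 0 and actstring[-1] raises IndexError).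
def Pre_checklen (l : Int) (mystr : String) (actstring : String) : Prop :=
  (mystr.toList.all (fun c => ['0', '1', '2', '3', '4', '5', '6', '7', '8', '9'].contains c) &&
   (!(actstring.toList.isEmpty) || !(mystr.toList.contains '0'))) = true
instance (l : Int) (mystr : String) (actstring : String) : Decidable (Pre_checklen l mystr actstring) := by unfold Pre_checklen; infer_instance

def pvWitness_checklen : Int × String × String := (0, "3", "abcd")

def Spec_checklen (l : Int) (mystr : String) (actstring : String) (out : String) : Prop := out = checklen_alt l mystr actstring
instance (l : Int) (mystr : String) (actstring : String) (out : String) : Decidable (Spec_checklen l mystr actstring out) := by unfold Spec_checklen; infer_instance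

-- ===== CLAIM (what is proved, stated in full; the proofs are below) =====
def Claim_equal_checklen : Prop := ∀ (l : Int) (mystr : String) (actstring : String), Dom_checklen l mystr actstring → Pre_checklen l mystr actstring → Spec_checklen l mystr actstring (checklen l mystr actstring)

-- ===== LEMMAS AND PROOFS =====

-- each digit character's int() value is between 0 and 9
theorem pvIntChar_digit : ∀ c ∈ ['0', '1', '2', '3', '4', '5', '6', '7', '8', '9'],
    0 ≤ pvIntChar c ∧ pvIntChar c ≤ 9 := by
  intro c hc
  fin_cases hc <;> exact ⟨by decide, by decide⟩

theorem pvDescend_none (s : List Int) (act : String) (m : Nat)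
    (h : ∀ v : Int, 0 ≤ v → v ≤ (m : Int) → v ∉ s) : pvDescend s act m = "X" := by
  induction m with
  | zero => rw [pvDescend, if_neg (h 0 le_rfl (by simp))]
  | succ n ih =>
      rw [pvDescend, if_neg (h ((n : Int) + 1) (by omega) (by push_cast; omega))]
      exact ih (fun v hv hvm => h v hv (by push_cast; omega))

theorem pvDescend_max (s : List Int) (act : String) (m : Nat) (a : Int)
    (ha : a ∈ s) (h0 : 0 ≤ a) (ham : a ≤ (m : Int))
    (hmax : ∀ v : Int, v ∈ s → v ≤ (m : Int) → v ≤ a) :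
    pvDescend s act m = String.ofList [(PySem.Str.pyGet? act (a - 1)).getD 'X'] := by
  induction m with
  | zero =>
      have ha0 : a = 0 := by simp only [Nat.cast_zero] at ham; omega
      subst ha0
      rw [pvDescend, if_pos ha]
  | succ n ih =>
      by_cases hmem : ((n : Int) + 1) ∈ s
      · have h1 : ((n : Int) + 1) ≤ a := hmax _ hmem (by push_cast; omega)
        have h2 : a = (n : Int) + 1 := by push_cast at ham; omega
        rw [pvDescend, if_pos hmem, h2]
      · have han : a ≤ (n : Int) := by
          push_cast at ham
          rcases eq_or_lt_of_le ham with h | h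
          · exact absurd (h ▸ ha) hmem
          · omega
        rw [pvDescend, if_neg hmem]
        exact ih han (fun v hv hvn => hmax v hv (by push_cast; omega))

-- ===== VERDICT =====
theorem checklen_spec : Claim_equal_checklen := by
  intro l mystr actstring _ hpre
  unfold Pre_checklen at hpre
  rw [Bool.and_eq_true] at hpre
  have hdig : ∀ c ∈ mystr.toList, c ∈ ['0', '1', '2', '3', '4', '5', '6', '7', '8', '9'] := by
    intro c hc
    simpa using List.all_eq_true.mp hpre.1 c hc
  unfold Spec_checklen checklen checklen_alt
  -- shape A's loop into map-of-filter
  have hfold := PySem.List.foldl_append_if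
      (fun c => decide (pvIntChar c ≤ PySem.Str.len actstring)) pvIntChar mystr.toList []
  simp only [decide_eq_true_eq, List.nil_append] at hfold
  rw [hfold]
  set L : Int := PySem.Str.len actstring with hL
  have hL0 : 0 ≤ L := by rw [hL, PySem.Str.len_eq]; positivity
  set numlist : List Int :=
    (mystr.toList.filter (fun c => decide (pvIntChar c ≤ L))).map pvIntChar with hnum
  -- characterise membership in numlist and in B's set
  have hmem_num : ∀ v : Int, v ∈ numlist ↔ ∃ c ∈ mystr.toList, pvIntChar c = v ∧ v ≤ L := by
    intro v
    simp only [hnum, List.mem_map, List.mem_filter, decide_eq_true_eq]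
    constructor
    · rintro ⟨c, ⟨hc, hcle⟩, rfl⟩; exact ⟨c, hc, rfl, hcle⟩
    · rintro ⟨c, hc, rfl, hcle⟩; exact ⟨c, ⟨hc, hcle⟩, rfl⟩
  have hmem_set : ∀ v : Int, v ∈ PySem.Set.ofList (mystr.toList.map pvIntChar) ↔
      ∃ c ∈ mystr.toList, pvIntChar c = v := by
    intro v
    rw [PySem.Set.mem_ofList]
    simp [List.mem_map, eq_comm]
  have hm : ((min L 9).toNat : Int) = min L 9 := by omega
  cases hmax : PySem.List.max? numlist (fun x => x) with
  | none =>
      have hempty : numlist = [] := (PySem.List.max?_eq_none_iff numlist _).mp hmax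
      simp only [hmax]
      rw [pvDescend_none]
      intro v hv0 hvm hvs
      obtain ⟨c, hc, hcv⟩ := (hmem_set v).mp hvs
      have hvL : v ≤ L := by rw [hm] at hvm; omega
      have : v ∈ numlist := (hmem_num v).mpr ⟨c, hc, hcv, hvL⟩
      simp [hempty] at this
  | some a =>
      obtain ⟨c, hc, hca, haL⟩ := (hmem_num a).mp (PySem.List.max?_mem hmax)
      obtain ⟨h0, h9⟩ := hca ▸ pvIntChar_digit c (hdig c hc)
      rw [pvDescend_max (PySem.Set.ofList (mystr.toList.map pvIntChar)) actstring _ a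
        ((hmem_set a).mpr ⟨c, hc, hca⟩) h0 (by rw [hm]; omega)
        (fun v hvs hvm => by
          obtain ⟨c', hc', hcv⟩ := (hmem_set v).mp hvs
          have hvL : v ≤ L := by rw [hm] at hvm; omega
          exact PySem.List.max?_isMax hmax v ((hmem_num v).mpr ⟨c', hc', hcv, hvL⟩))]
      simp only [hmax]
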